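-- pv_equiv track=rewrite | github.com/kornev-aa/LAB | LAB6/block_five.py | count_numbers_with_digits
-- ===== SOURCE A (Python) =====
-- def count_numbers_with_digits(a, b, c, n):
--
--     # Подсчитывает количество чисел на отрезке [100, n], которые состоят только из цифр a, b и c.
--
--     # :param a: первая допустимая цифра
--     # :param b: вторая допустимая цифра
--     # :param c: третья допустимая цифра
--     # :param n: верхняя граница диапазона (210 < n < 231)
--     # :return: количество чисел, состоящих только из цифр a, b и c
--
--     # Проверка на корректность ввода
--     if not (210 < n < 231):
--         raise ValueError("N must be in [211; 230] range.")
--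
--     valid_digits = {str(a), str(b), str(c)}  # Множество допустимых цифр
--     count = 0  # Счетчик подходящих чисел
--
--     for number in range(100, n + 1):
--         str_number = str(number)  # Преобразуем число в строку
--         if all(digit in valid_digits for digit in str_number):  # Проверяем все цифры числа
--             count += 1  # Если все цифры подходят, увеличиваем счетчик
--
--     return count
-- ===== SOURCE B (Python) =====
-- def count_numbers_with_digits(a, b, c, n):
--     if not (210 < n < 231):
--         raise ValueError("N must be in [211; 230] range.")
--     valid_digits = {str(a), str(b), str(c)}
--     count = 0
--     # enumerate digit positions: hundreds h, tens t, units u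
--     for h in (1, 2):
--         for t in range(10):
--             for u in range(10):
--                 num = 100 * h + 10 * t + u
--                 if num <= n and str(h) in valid_digits and str(t) in valid_digits and str(u) in valid_digits:
--                     count += 1
--     return count
-- ===== Notes on version B (the rewrite author's own statement) =====
-- stated objective: alternative
-- what changed: Instead of scanning every integer in range(100, n+1) and re-stringifying each to test all its characters, B enumerates the three digit positions (hundreds in (1,2), tens and units in range(10)), reconstructs num = 100*h+10*t+u, and counts triples with num <= n whose digit strings lie in the valid set; no per-number str() decomposition remains.
import Mathlib
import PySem

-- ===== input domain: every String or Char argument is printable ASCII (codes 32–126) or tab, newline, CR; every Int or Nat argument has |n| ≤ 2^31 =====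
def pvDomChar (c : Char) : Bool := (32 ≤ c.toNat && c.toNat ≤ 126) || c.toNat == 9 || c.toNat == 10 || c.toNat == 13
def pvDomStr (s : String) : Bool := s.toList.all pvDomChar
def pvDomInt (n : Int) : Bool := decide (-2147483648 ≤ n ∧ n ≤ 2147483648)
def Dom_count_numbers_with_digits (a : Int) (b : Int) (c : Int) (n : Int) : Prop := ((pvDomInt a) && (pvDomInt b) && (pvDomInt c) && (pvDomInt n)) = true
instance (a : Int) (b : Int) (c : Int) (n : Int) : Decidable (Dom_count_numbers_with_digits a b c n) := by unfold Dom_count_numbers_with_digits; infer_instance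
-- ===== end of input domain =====

-- B enumerates the three digit positions (h, t, u) instead of scanning every integer in [100, n]
-- and decomposing it back into characters via str(); same return value on all inputs A accepts.

-- ===== PORT A =====
def count_numbers_with_digits (a : Int) (b : Int) (c : Int) (n : Int) : Int :=
  -- 'if not (210 < n < 231): raise ValueError' → excluded by Pre_count_numbers_with_digits
  let valid : PySem.Set String :=
    PySem.Set.ofList [PySem.Int.toStr a, PySem.Int.toStr b, PySem.Int.toStr c]
  (PySem.List.pyRange 100 (n + 1) 1).foldl
    (fun count number =>
      if (PySem.Int.toStr number).toList.all
           (fun digit => PySem.Set.contains valid (String.ofList [digit]))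
      then count + 1 else count)
    0

-- ===== PORT B =====
def count_numbers_with_digits_alt (a : Int) (b : Int) (c : Int) (n : Int) : Int :=
  -- same ValueError guard as A → excluded by Pre_count_numbers_with_digits
  let valid : PySem.Set String :=
    PySem.Set.ofList [PySem.Int.toStr a, PySem.Int.toStr b, PySem.Int.toStr c]
  [(1 : Int), 2].foldl
    (fun count h =>
      (PySem.List.pyRange 0 10 1).foldl
        (fun count t =>
          (PySem.List.pyRange 0 10 1).foldl
            (fun count u =>
              if decide (100 * h + 10 * t + u ≤ n) &&
                 (PySem.Set.contains valid (PySem.Int.toStr h) &&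
                  (PySem.Set.contains valid (PySem.Int.toStr t) &&
                   PySem.Set.contains valid (PySem.Int.toStr u)))
              then count + 1 else count)
            count)
        count)
    0

-- ===== PRECONDITION & SPEC =====
-- Pre_ excludes exactly the inputs on which A (and B) raises ValueError: n outside (210, 231).
def Pre_count_numbers_with_digits (a : Int) (b : Int) (c : Int) (n : Int) : Prop :=
  210 < n ∧ n < 231
instance (a : Int) (b : Int) (c : Int) (n : Int) : Decidable (Pre_count_numbers_with_digits a b c n) := by unfold Pre_count_numbers_with_digits; infer_instance
def pvWitness_count_numbers_with_digits : Int × Int × Int × Int := (1, 2, 3, 230)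

def Spec_count_numbers_with_digits (a : Int) (b : Int) (c : Int) (n : Int) (out : Int) : Prop := out = count_numbers_with_digits_alt a b c n
instance (a : Int) (b : Int) (c : Int) (n : Int) (out : Int) : Decidable (Spec_count_numbers_with_digits a b c n out) := by unfold Spec_count_numbers_with_digits; infer_instance

-- ===== CLAIM (what is proved, stated in full; the proofs are below) =====
def Claim_equal_count_numbers_with_digits : Prop := ∀ (a : Int) (b : Int) (c : Int) (n : Int), Dom_count_numbers_with_digits a b c n → Pre_count_numbers_with_digits a b c n → Spec_count_numbers_with_digits a b c n (count_numbers_with_digits a b c n)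

-- ===== LEMMAS AND PROOFS =====

-- a single digit 0..9: testing all characters of str(d) is one membership test of str(d)
lemma all_chars_single_digit (f : String → Bool) (d : Int)
    (hd : d ∈ PySem.List.pyRange 0 10 1) :
    (PySem.Int.toChars d).all (fun ch => f (String.ofList [ch])) = f (PySem.Int.toStr d) := by
  have h : PySem.Int.toChars d = [(PySem.Int.toChars d).getD 0 ' '] ∧
      PySem.Int.toStr d = String.ofList [(PySem.Int.toChars d).getD 0 ' '] := by
    revert hd; revert d; decide
  rw [h.2, h.1]
  simp [List.all]

-- the decimal digits of 100*h + 10*t + u, for digit triples in B's ranges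
lemma toChars_triple : ∀ h ∈ [(1 : Int), 2], ∀ t ∈ PySem.List.pyRange 0 10 1,
    ∀ u ∈ PySem.List.pyRange 0 10 1,
    PySem.Int.toChars (100 * h + 10 * t + u) =
      PySem.Int.toChars h ++ (PySem.Int.toChars t ++ PySem.Int.toChars u) := by
  decide

-- A's per-number test equals B's three per-digit tests
lemma cond_eq (f : String → Bool) :
    ∀ h ∈ [(1 : Int), 2], ∀ t ∈ PySem.List.pyRange 0 10 1, ∀ u ∈ PySem.List.pyRange 0 10 1,
    (PySem.Int.toStr (100 * h + 10 * t + u)).toList.all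
        (fun ch => f (String.ofList [ch])) =
      (f (PySem.Int.toStr h) && (f (PySem.Int.toStr t) && f (PySem.Int.toStr u))) := by
  intro h hh t ht u hu
  have hh' : h ∈ PySem.List.pyRange 0 10 1 := by
    simp only [List.mem_cons, List.not_mem_nil, or_false] at hh
    rcases hh with rfl | rfl <;> decide
  rw [PySem.Int.toList_toStr, toChars_triple h hh t ht u hu]
  simp only [List.all_append]
  rw [all_chars_single_digit f h hh', all_chars_single_digit f t ht,
      all_chars_single_digit f u hu]

-- B's digit triples enumerate exactly the integers 100..299, in order
set_option maxRecDepth 4000 in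
lemma range_eq_flatMap :
    PySem.List.pyRange 100 300 1 =
      [(1 : Int), 2].flatMap (fun h =>
        (PySem.List.pyRange 0 10 1).flatMap (fun t =>
          (PySem.List.pyRange 0 10 1).map (fun u => 100 * h + 10 * t + u))) := by
  decide

lemma sum_map_cast (l : List Int) (c : Int → Nat) :
    (l.map (fun t => (c t : Int))).sum = ((l.map c).sum : Int) := by
  rw [Nat.cast_list_sum, List.map_map]; rfl

-- the whole count, at the Nat level: A's linear scan equals B's digit-position sum
lemma main_nat (f : String → Bool) (n : Int) (h1 : 210 < n) (h2 : n < 231) :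
    List.countP (fun m => (PySem.Int.toStr m).toList.all fun d => f (String.ofList [d]))
        (PySem.List.pyRange 100 (n + 1) 1)
      = (List.map (fun h =>
          (List.map (fun t =>
            List.countP (fun u =>
              decide (100 * h + 10 * t + u ≤ n) &&
                (f (PySem.Int.toStr h) && (f (PySem.Int.toStr t) && f (PySem.Int.toStr u))))
              (PySem.List.pyRange 0 10 1)) (PySem.List.pyRange 0 10 1)).sum) [(1 : Int), 2]).sum := by
  set pA := fun m : Int => (PySem.Int.toStr m).toList.all fun d => f (String.ofList [d]) with hpA
  set g := fun m : Int => decide (m ≤ n) && pA m with hg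
  have e1 : List.countP pA (PySem.List.pyRange 100 (n + 1) 1)
      = List.countP g (PySem.List.pyRange 100 (n + 1) 1) := by
    apply List.countP_congr
    intro m hm
    rw [PySem.List.mem_pyRange_one] at hm
    simp [hg, show m ≤ n by omega]
  have e2 : List.countP g (PySem.List.pyRange (n + 1) 300 1) = 0 := by
    rw [List.countP_eq_zero]
    intro m hm
    rw [PySem.List.mem_pyRange_one] at hm
    simp [hg, show ¬ (m ≤ n) by omega]
  have stepL : List.countP pA (PySem.List.pyRange 100 (n + 1) 1)
      = List.countP g (PySem.List.pyRange 100 300 1) := by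
    rw [PySem.List.pyRange_one_append 100 (n + 1) 300 (by omega) (by omega), List.countP_append,
      e2, Nat.add_zero, e1]
  rw [stepL, range_eq_flatMap]
  simp only [List.countP_flatMap, Function.comp_def, List.countP_map]
  apply congrArg List.sum
  apply List.map_congr_left; intro h hh
  apply congrArg List.sum
  apply List.map_congr_left; intro t ht
  apply List.countP_congr
  intro u hu
  have hc := cond_eq f h hh t ht u hu
  simp only [hg, hpA]
  rw [hc]

-- ===== VERDICT (by name: the statement is the Claim_ definition above) =====
theorem count_numbers_with_digits_spec : Claim_equal_count_numbers_with_digits := by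
  intro a b c n _ hpre
  obtain ⟨h1, h2⟩ := hpre
  unfold Spec_count_numbers_with_digits count_numbers_with_digits count_numbers_with_digits_alt
  set S : PySem.Set String :=
    PySem.Set.ofList [PySem.Int.toStr a, PySem.Int.toStr b, PySem.Int.toStr c] with hS
  set f : String → Bool := fun s => PySem.Set.contains S s with hf
  -- collapse both sides to countP sums
  simp only [PySem.List.foldl_count_if, PySem.List.foldl_add, zero_add]
  simp only [sum_map_cast]
  exact_mod_cast main_nat f n h1 h2
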